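-- pv_equiv track=rewrite | github.com/taras-svystun/Contest1 | PyThon/J.py | k_sort
-- ===== SOURCE A (Python) =====
-- def k_sort(array, k, length):
--     permutations = 0
--
--     #  This loop is to sort k subarays
--     for k_th_array in range(k + 1):
--         changed = True
--
--         while changed:
--             changed = False
--             for inner in range(k_th_array, length, k):
--                 successor = inner + k
--                 if successor < length:
--                     if array[inner] > array[successor]:
--                         array[inner], array[successor] = array[successor], array[inner]
--                         permutations += 1
--                         changed = True
--
--     if array == sorted(array):
--         return permutations
--     return -1
-- ===== SOURCE B (Python) =====
-- def _sort_count(a):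
--     # merge sort returning (#inversions, sorted list)
--     if len(a) <= 1:
--         return 0, a
--     mid = len(a) // 2
--     li, left = _sort_count(a[:mid])
--     ri, right = _sort_count(a[mid:])
--     inv = li + ri
--     res = []
--     i = j = 0
--     while i < len(left) and j < len(right):
--         if left[i] <= right[j]:
--             res.append(left[i]); i += 1
--         else:
--             res.append(right[j]); j += 1; inv += len(left) - i
--     res.extend(left[i:]); res.extend(right[j:])
--     return inv, res
--
--
-- def k_sort(array, k, length):
--     n = len(array)
--     out = list(array)
--     total = 0
--     if k > 0:
--         m = min(length, n)
--         for off in range(min(k, m)):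
--             idxs = range(off, m, k)
--             inv, srt = _sort_count([array[i] for i in idxs])
--             total += inv
--             for i, v in zip(idxs, srt):
--                 out[i] = v
--     return total if out == sorted(out) else -1
-- ===== Notes on version B (the rewrite author's own statement) =====
-- stated objective: alternative
-- what changed: A repeatedly bubble-passes each stride-k subarray in place until no swap occurs, counting swaps; B counts each subarray's inversions with a single merge sort and writes the sorted subarrays into a fresh copy (B also does not mutate its argument, unlike A).
import Mathlib
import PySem

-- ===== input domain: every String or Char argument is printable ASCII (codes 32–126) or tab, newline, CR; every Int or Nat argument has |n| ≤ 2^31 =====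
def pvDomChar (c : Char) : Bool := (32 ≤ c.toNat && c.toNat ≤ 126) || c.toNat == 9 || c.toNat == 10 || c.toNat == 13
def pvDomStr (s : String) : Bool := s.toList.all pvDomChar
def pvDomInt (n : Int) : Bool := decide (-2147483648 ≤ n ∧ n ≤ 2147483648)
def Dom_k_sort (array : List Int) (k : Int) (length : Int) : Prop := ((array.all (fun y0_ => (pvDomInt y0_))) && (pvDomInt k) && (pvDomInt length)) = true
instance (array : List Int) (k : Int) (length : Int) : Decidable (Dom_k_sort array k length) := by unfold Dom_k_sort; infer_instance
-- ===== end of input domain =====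

-- B counts each stride-k subarray's inversions with a single merge sort instead of A's
-- repeated bubbling passes over the array.  A sorts `array` in place; B does not mutate
-- its argument — the equivalence proved here is about the RETURN value only.

-- ===== PORT A =====
-- one step of A's inner 'for inner in range(k_th_array, length, k)' pass
-- (state: (array, permutations, changed)); reads use pyGetD/pySetD, exact since
-- Pre_k_sort guarantees every accessed index is in range (Python raises otherwise)
def aPassStep (k length : Int) (st : List Int × Int × Bool) (inner : Int) : List Int × Int × Bool :=
  if inner + k < length then
    if PySem.List.pyGetD st.1 (inner + k) 0 < PySem.List.pyGetD st.1 inner 0 then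
      (PySem.List.pySetD (PySem.List.pySetD st.1 inner (PySem.List.pyGetD st.1 (inner + k) 0))
         (inner + k) (PySem.List.pyGetD st.1 inner 0),
       st.2.1 + 1, true)
    else st
  else st

-- A's 'while changed' loop; fuel only makes it total: each pass that swaps strictly
-- decreases the subarray's inversion count (< array.length² + 1), proved below, so the
-- fuel used in k_sort never runs out on inputs admitted by Pre_k_sort
def aWhile (fuel : Nat) (k length k_th : Int) (arr : List Int) (perms : Int) : List Int × Int :=
  match fuel with
  | 0 => (arr, perms)
  | fuel + 1 =>
    let st := (PySem.List.pyRange k_th length k).foldl (aPassStep k length) (arr, perms, false)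
    if st.2.2 then aWhile fuel k length k_th st.1 st.2.1 else (st.1, st.2.1)

def k_sort (array : List Int) (k : Int) (length : Int) : Int :=
  let st := (PySem.List.pyRange 0 (k + 1) 1).foldl
    (fun (st : List Int × Int) k_th_array =>
       aWhile (array.length * array.length + 1) k length k_th_array st.1 st.2)
    (array, 0)
  if st.1 = PySem.List.sorted st.1 (fun x => x) then st.2 else -1

-- ===== PORT B =====
-- merge step of Source B's _sort_count: mergeC left right inv; 'len(left) - i' remaining
-- left elements are (x :: l).length at the moment right's head is taken
def mergeC : List Int → List Int → Int → Int × List Int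
  | [], r, inv => (inv, r)
  | x :: l, [], inv => (inv, x :: l)
  | x :: l, y :: r, inv =>
    if x ≤ y then
      let rec' := mergeC l (y :: r) inv
      (rec'.1, x :: rec'.2)
    else
      let rec' := mergeC (x :: l) r (inv + ((x :: l).length : Int))
      (rec'.1, y :: rec'.2)
  termination_by l r _ => l.length + r.length

-- Source B's _sort_count: merge sort returning (#inversions, sorted list); a[:mid]/a[mid:]
-- are take/drop (exact: PySem.List.slice_natCast / slice_from_natCast)
def sortCount : List Int → Int × List Int
  | [] => (0, [])
  | [x] => (0, [x])
  | x :: y :: t =>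
    let a := x :: y :: t
    let mid := a.length / 2
    let L := sortCount (a.take mid)
    let R := sortCount (a.drop mid)
    mergeC L.2 R.2 (L.1 + R.1)
  termination_by l => l.length
  decreasing_by all_goals simp [List.length_take, List.length_drop]; omega

def k_sort_alt (array : List Int) (k : Int) (length : Int) : Int :=
  let n : Int := array.length
  let init : List Int × Int := (array, 0)
  let st :=
    if 0 < k then
      let m := min length n
      (PySem.List.pyRange 0 (min k m) 1).foldl
        (fun (st : List Int × Int) off =>
          let idxs := PySem.List.pyRange off m k
          let r := sortCount (idxs.map (fun i => PySem.List.pyGetD array i 0))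
          ((idxs.zip r.2).foldl (fun o iv => PySem.List.pySetD o iv.1 iv.2) st.1, st.2 + r.1))
        init
    else init
  if st.1 = PySem.List.sorted st.1 (fun x => x) then st.2 else -1

-- ===== PRECONDITION & SPEC =====
-- Pre_ excludes exactly the inputs where the Python A raises: k = 0 (range step 0,
-- ValueError) and 0 < k < length with len(array) < length (IndexError past the end).
def Pre_k_sort (array : List Int) (k : Int) (length : Int) : Prop :=
  k ≠ 0 ∧ ¬(0 < k ∧ k < length ∧ (array.length : Int) < length)
instance (array : List Int) (k : Int) (length : Int) : Decidable (Pre_k_sort array k length) := by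
  unfold Pre_k_sort; infer_instance
def pvWitness_k_sort : List Int × Int × Int := ([3, 1, 2], 1, 3)

def Spec_k_sort (array : List Int) (k : Int) (length : Int) (out : Int) : Prop := out = k_sort_alt array k length
instance (array : List Int) (k : Int) (length : Int) (out : Int) : Decidable (Spec_k_sort array k length out) := by unfold Spec_k_sort; infer_instance

-- ===== CLAIM (what is proved, stated in full; the proofs are below) =====
def Claim_equal_k_sort : Prop := ∀ (array : List Int) (k : Int) (length : Int), Dom_k_sort array k length → Pre_k_sort array k length → Spec_k_sort array k length (k_sort array k length)

-- ===== LEMMAS AND PROOFS =====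

-- proof-side vocabulary
def csorted (l : List Int) : List Int := PySem.List.sorted l (fun x => x)
def gather (arr : List Int) (ps : List Int) : List Int := ps.map (fun i => PySem.List.pyGetD arr i 0)
def scat : List Int → List Int → List Int → List Int
  | arr, p :: ps, v :: vs => scat (PySem.List.pySetD arr p v) ps vs
  | arr, _, _ => arr
def inv : List Int → Nat
  | [] => 0
  | x :: t => t.countP (fun y => decide (y < x)) + inv t
def bpass : List Int → List Int × Nat
  | [] => ([], 0)
  | [x] => ([x], 0)
  | x :: y :: t =>
    if y < x then let r := bpass (x :: t); (y :: r.1, r.2 + 1)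
    else let r := bpass (y :: t); (x :: r.1, r.2)
def cross (l r : List Int) : Nat := (l.map (fun x => r.countP (fun y => decide (y < x)))).sum
def OkPos (n : Nat) (ps : List Int) : Prop := ps.Pairwise (· < ·) ∧ ∀ p ∈ ps, 0 ≤ p ∧ p < (n : Int)

-- pyRange with a general positive step: cons/nil forms
theorem pyRange_pos_eq_nil {a b s : Int} (hs : 0 < s) (h : b ≤ a) : PySem.List.pyRange a b s = [] := by
  rw [PySem.List.pyRange_of_pos a b hs]
  simp [not_lt.2 h]
theorem pyRange_pos_cons {a b s : Int} (hs : 0 < s) (h : a < b) :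
    PySem.List.pyRange a b s = a :: PySem.List.pyRange (a + s) b s := by
  rw [PySem.List.pyRange_of_pos a b hs, PySem.List.pyRange_of_pos (a + s) b hs]
  simp only [if_pos h]
  by_cases h2 : a + s < b
  · simp only [if_pos h2]
    have hN : ((b - a + s - 1) / s).toNat = ((b - (a + s) + s - 1) / s).toNat + 1 := by
      have e1 : b - a + s - 1 = (b - (a + s) + s - 1) + 1 * s := by ring
      have hge : 0 ≤ (b - (a + s) + s - 1) / s := Int.ediv_nonneg (by omega) (by omega)
      rw [e1, Int.add_mul_ediv_right _ _ (ne_of_gt hs)]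
      omega
    rw [hN, List.range_succ_eq_map]
    simp only [List.map_cons, List.map_map]
    refine congrArg₂ List.cons ?_ ?_
    · push_cast; ring
    · apply List.map_congr_left
      intro x _
      simp only [Function.comp_apply]
      push_cast
      ring
  · simp only [if_neg h2]
    have h3 : b ≤ a + s := not_lt.1 h2
    have hdd : (b - a + s - 1) / s = 1 := by
      rw [← PySem.Int.floordiv_eq_ediv_of_pos hs, PySem.Int.floordiv_eq_iff_of_pos hs]
      have : (1 + 1) * s = 2 * s := by ring
      omega
    rw [hdd]
    simp
theorem okpos_pyRange {n : Nat} {o b k : Int} (hk : 0 < k) (ho : 0 ≤ o) (hb : b ≤ (n : Int)) :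
    OkPos n (PySem.List.pyRange o b k) := by
  constructor
  · rw [PySem.List.pyRange_of_pos o b hk]
    apply List.Pairwise.map
    · intro x y hxy
      have : k * (x:Int) < k * (y:Int) := by
        apply mul_lt_mul_of_pos_left _ hk
        exact_mod_cast hxy
      omega
    · exact List.pairwise_lt_range
  · intro p hp
    rw [PySem.List.mem_pyRange_iff_of_pos hk] at hp
    omega
theorem length_pyRange_le {n : Nat} {o b k : Int} (hk : 0 < k) (ho : 0 ≤ o) (hb : b ≤ (n : Int)) :
    (PySem.List.pyRange o b k).length ≤ n := by
  rw [PySem.List.pyRange_of_pos o b hk]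
  rw [List.length_map, List.length_range]
  by_cases h : o < b
  · simp only [if_pos h]
    set c : Int := b - o with hc
    have hc1 : 1 ≤ c := by omega
    have hck : c ≤ c * k := le_mul_of_one_le_right (by omega) (by omega)
    have hlt : (c + k - 1) / k < c + 1 := by
      rw [← PySem.Int.floordiv_eq_ediv_of_pos hk, PySem.Int.floordiv_lt_iff_lt_mul hk]
      have : (c + 1) * k = c * k + k := by ring
      omega
    have hge : 0 ≤ (c + k - 1) / k := Int.ediv_nonneg (by omega) (by omega)
    omega
  · simp [if_neg h]

-- scat/gather basics
theorem length_scat (arr ps vs : List Int) : (scat arr ps vs).length = arr.length := by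
  induction ps generalizing arr vs with
  | nil => simp [scat]
  | cons p ps ih =>
    cases vs with
    | nil => simp [scat]
    | cons v vs => rw [scat, ih, PySem.List.length_pySetD]
theorem zipfold_eq_scat (arr ps vs : List Int) :
    (ps.zip vs).foldl (fun o iv => PySem.List.pySetD o iv.1 iv.2) arr = scat arr ps vs := by
  induction ps generalizing arr vs with
  | nil => simp [scat]
  | cons p ps ih =>
    cases vs with
    | nil => simp [scat]
    | cons v vs => simp only [List.zip_cons_cons, List.foldl_cons, scat]; exact ih _ _
theorem pyGetD_pySetD_ne (arr : List Int) {p q : Int} (v : Int) (hp : 0 ≤ p) (hq : 0 ≤ q)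
    (hne : p ≠ q) : PySem.List.pyGetD (PySem.List.pySetD arr q v) p 0 = PySem.List.pyGetD arr p 0 := by
  rw [PySem.List.pySetD_of_nonneg _ _ hq]
  have hp' : p = ((p.toNat : Nat) : Int) := by omega
  rw [hp', PySem.List.pyGetD_natCast, PySem.List.pyGetD_natCast]
  rw [List.getD_eq_getElem?_getD, List.getD_eq_getElem?_getD]
  rw [List.getElem?_set_ne]
  omega
theorem pySetD_self (arr : List Int) {p : Int} (hp : 0 ≤ p) (hlt : p < (arr.length : Int)) :
    PySem.List.pySetD arr p (PySem.List.pyGetD arr p 0) = arr := by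
  rw [PySem.List.pySetD_of_nonneg _ _ hp, PySem.List.pyGetD_eq_getElem arr 0 hp hlt]
  exact List.set_getElem_self (by omega)
theorem pyGetD_scat_notmem (arr ps vs : List Int) {q : Int} (hq : 0 ≤ q) (hmem : q ∉ ps)
    (hps : ∀ p ∈ ps, 0 ≤ p) :
    PySem.List.pyGetD (scat arr ps vs) q 0 = PySem.List.pyGetD arr q 0 := by
  induction ps generalizing arr vs with
  | nil => simp [scat]
  | cons p ps ih =>
    cases vs with
    | nil => simp [scat]
    | cons v vs =>
      rw [scat, ih _ _ (fun hx => hmem (List.mem_cons_of_mem _ hx)) (fun x hx => hps x (List.mem_cons_of_mem _ hx))]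
      exact pyGetD_pySetD_ne arr v hq (hps p (List.mem_cons_self ..)) (fun he => hmem (he ▸ List.mem_cons_self ..))
theorem scat_set_comm (arr ps vs : List Int) {q : Int} (v : Int) (hq : 0 ≤ q) (hmem : q ∉ ps)
    (hps : ∀ p ∈ ps, 0 ≤ p) :
    scat (PySem.List.pySetD arr q v) ps vs = PySem.List.pySetD (scat arr ps vs) q v := by
  induction ps generalizing arr vs with
  | nil => simp [scat]
  | cons p ps ih =>
    cases vs with
    | nil => simp [scat]
    | cons v' vs =>
      rw [scat, scat]
      have hqp : q ≠ p := fun he => hmem (he ▸ List.mem_cons_self ..)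
      have h0p : 0 ≤ p := hps p (List.mem_cons_self ..)
      have hcomm : PySem.List.pySetD (PySem.List.pySetD arr q v) p v' = PySem.List.pySetD (PySem.List.pySetD arr p v') q v := by
        rw [PySem.List.pySetD_of_nonneg _ _ hq, PySem.List.pySetD_of_nonneg _ _ h0p,
            PySem.List.pySetD_of_nonneg _ _ h0p, PySem.List.pySetD_of_nonneg _ _ hq]
        exact List.set_comm _ _ (by omega)
      rw [hcomm]
      exact ih _ _ (fun hx => hmem (List.mem_cons_of_mem _ hx)) (fun x hx => hps x (List.mem_cons_of_mem _ hx))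
theorem scat_scat {arr ps us vs : List Int} (hu : us.length = ps.length) (hv : vs.length = ps.length)
    (hps : ps.Pairwise (· < ·)) (hnn : ∀ p ∈ ps, 0 ≤ p) :
    scat (scat arr ps us) ps vs = scat arr ps vs := by
  induction ps generalizing arr us vs with
  | nil => simp [scat]
  | cons p ps ih =>
    cases us with
    | nil => simp at hu
    | cons u us =>
      cases vs with
      | nil => simp at hv
      | cons v vs =>
        have hpmem : p ∉ ps := by
          intro hmem
          exact absurd (List.rel_of_pairwise_cons hps hmem) (lt_irrefl p)
        have h0 : ∀ x ∈ p :: ps, 0 ≤ x := hnn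
        rw [scat, scat, scat]
        have h0p : 0 ≤ p := h0 p (List.mem_cons_self ..)
        have hc := scat_set_comm (PySem.List.pySetD arr p u) ps us (v := v)
          h0p hpmem (fun x hx => h0 x (List.mem_cons_of_mem _ hx))
        rw [← hc]
        have hset : PySem.List.pySetD (PySem.List.pySetD arr p u) p v = PySem.List.pySetD arr p v := by
          rw [PySem.List.pySetD_of_nonneg _ _ h0p, PySem.List.pySetD_of_nonneg _ _ h0p,
              PySem.List.pySetD_of_nonneg _ _ h0p, List.set_set]
        rw [hset]
        exact ih (by simpa using hu) (by simpa using hv) hps.of_cons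
          (fun x hx => h0 x (List.mem_cons_of_mem _ hx))
theorem gather_scat_same {n : Nat} {arr ps vs : List Int} (hlen : arr.length = n)
    (hv : vs.length = ps.length) (hok : OkPos n ps) :
    gather (scat arr ps vs) ps = vs := by
  induction ps generalizing arr vs with
  | nil => simp at hv; simp [gather, hv]
  | cons p ps ih =>
    cases vs with
    | nil => simp at hv
    | cons v vs =>
      obtain ⟨hpw, hbd⟩ := hok
      have h0p : 0 ≤ p := (hbd p (List.mem_cons_self ..)).1
      have hplt : p < (n : Int) := (hbd p (List.mem_cons_self ..)).2
      have hpmem : p ∉ ps := by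
        intro hmem
        exact absurd (List.rel_of_pairwise_cons hpw hmem) (lt_irrefl p)
      rw [scat]
      simp only [gather, List.map_cons]
      refine congrArg₂ List.cons ?_ ?_
      · rw [pyGetD_scat_notmem _ _ _ h0p hpmem (fun x hx => (hbd x (List.mem_cons_of_mem _ hx)).1)]
        rw [PySem.List.pySetD_of_nonneg _ _ h0p,
            PySem.List.pyGetD_eq_getElem _ 0 h0p (by rw [List.length_set, hlen]; omega)]
        exact List.getElem_set_self (by rw [List.length_set, hlen]; omega)
      · have := ih (arr := PySem.List.pySetD arr p v) (vs := vs)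
          (by rw [PySem.List.length_pySetD]; exact hlen) (by simpa using hv)
          ⟨hpw.of_cons, fun x hx => hbd x (List.mem_cons_of_mem _ hx)⟩
        simpa [gather] using this
theorem gather_scat_disjoint {arr ps vs qs : List Int} (hq : ∀ q ∈ qs, 0 ≤ q)
    (hps : ∀ p ∈ ps, 0 ≤ p) (hdis : ∀ q ∈ qs, q ∉ ps) :
    gather (scat arr ps vs) qs = gather arr qs := by
  simp only [gather]
  apply List.map_congr_left
  intro q hq'
  exact pyGetD_scat_notmem _ _ _ (hq q hq') (hdis q hq') hps
theorem scat_gather_self {arr ps : List Int} (hok : OkPos arr.length ps) :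
    scat arr ps (gather arr ps) = arr := by
  induction ps generalizing arr with
  | nil => simp [gather, scat]
  | cons p ps ih =>
    obtain ⟨hpw, hbd⟩ := hok
    simp only [gather, List.map_cons, scat]
    rw [pySetD_self arr (hbd p (List.mem_cons_self ..)).1 (hbd p (List.mem_cons_self ..)).2]
    exact ih ⟨hpw.of_cons, fun x hx => hbd x (List.mem_cons_of_mem _ hx)⟩

-- bpass basics
theorem bpass_length (l : List Int) : (bpass l).1.length = l.length := by
  fun_induction bpass l with
  | case1 => rfl
  | case2 => rfl
  | case3 x y t h r ih => simpa [bpass, h, r] using ih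
  | case4 x y t h r ih => simpa [bpass, h, r] using ih
theorem bpass_perm (l : List Int) : (bpass l).1.Perm l := by
  fun_induction bpass l with
  | case1 => rfl
  | case2 => exact List.Perm.refl _
  | case3 x y t h r ih =>
    exact (ih.cons y).trans (List.Perm.swap x y t)
  | case4 x y t h r ih =>
    exact ih.cons x
theorem bpass_inv (l : List Int) : inv (bpass l).1 + (bpass l).2 = inv l := by
  fun_induction bpass l with
  | case1 => rfl
  | case2 => rfl
  | case3 x y t h r ih =>
    show inv (y :: r.1) + (r.2 + 1) = inv (x :: y :: t)
    have hcnt : r.1.countP (fun z => decide (z < y)) = (x :: t).countP (fun z => decide (z < y)) :=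
      (bpass_perm (x :: t)).countP_congr (fun _ _ => rfl)
    have hinv : inv r.1 + r.2 = inv (x :: t) := ih
    have e1 : (x :: t).countP (fun z => decide (z < y)) = t.countP (fun z => decide (z < y)) := by
      simp [List.countP_cons, show ¬ x < y by omega]
    have e2 : (y :: t).countP (fun z => decide (z < x)) = t.countP (fun z => decide (z < x)) + 1 := by
      simp [List.countP_cons, h]
    simp only [inv] at hinv ⊢
    omega
  | case4 x y t h r ih =>
    show inv (x :: r.1) + r.2 = inv (x :: y :: t)
    have hcnt : r.1.countP (fun z => decide (z < x)) = (y :: t).countP (fun z => decide (z < x)) :=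
      (bpass_perm (y :: t)).countP_congr (fun _ _ => rfl)
    have hinv : inv r.1 + r.2 = inv (y :: t) := ih
    simp only [inv] at hinv ⊢
    omega

theorem bpass_zero_eq {l : List Int} (h : (bpass l).2 = 0) : (bpass l).1 = l := by
  fun_induction bpass l with
  | case1 => rfl
  | case2 => rfl
  | case3 x y t hlt r ih => simp at h
  | case4 x y t hlt r ih =>
    simp only at h
    rw [ih h]
theorem bpass_zero_sorted {l : List Int} (h : (bpass l).2 = 0) : l.Pairwise (· ≤ ·) := by
  fun_induction bpass l with
  | case1 => exact List.Pairwise.nil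
  | case2 => simp
  | case3 x y t hlt r ih => simp at h
  | case4 x y t hlt r ih =>
    simp only at h
    have hp := ih h
    refine List.Pairwise.cons ?_ hp
    intro z hz
    rcases List.mem_cons.1 hz with rfl | hz
    · omega
    · have := List.rel_of_pairwise_cons hp hz
      omega
theorem inv_eq_zero_of_pairwise {l : List Int} (h : l.Pairwise (· ≤ ·)) : inv l = 0 := by
  induction l with
  | nil => rfl
  | cons x t ih =>
    simp only [inv]
    rw [List.countP_eq_zero.mpr, ih h.of_cons]
    intro y hy
    have := List.rel_of_pairwise_cons h hy
    simpa using this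
theorem inv_le_sq (l : List Int) : inv l ≤ l.length * l.length := by
  induction l with
  | nil => simp [inv]
  | cons x t ih =>
    simp only [inv, List.length_cons]
    have := List.countP_le_length (l := t) (p := fun y => decide (y < x))
    nlinarith

-- A's strided pass = gather / bubble pass / scatter
theorem passA_decomp (k b : Int) (hk : 0 < k) (arr : List Int) (hb : b ≤ (arr.length : Int))
    (o : Int) (ho : 0 ≤ o) (p : Int) (c : Bool) :
    (PySem.List.pyRange o b k).foldl (aPassStep k b) (arr, p, c)
    = (scat arr (PySem.List.pyRange o b k) (bpass (gather arr (PySem.List.pyRange o b k))).1,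
       p + ((bpass (gather arr (PySem.List.pyRange o b k))).2 : Int),
       c || decide ((bpass (gather arr (PySem.List.pyRange o b k))).2 ≠ 0)) := by
  have main : ∀ (N : Nat) (o : Int), (b - o).toNat ≤ N → 0 ≤ o →
      ∀ (arr : List Int) (p : Int) (c : Bool), b ≤ (arr.length : Int) →
      (PySem.List.pyRange o b k).foldl (aPassStep k b) (arr, p, c)
      = (scat arr (PySem.List.pyRange o b k) (bpass (gather arr (PySem.List.pyRange o b k))).1,
         p + ((bpass (gather arr (PySem.List.pyRange o b k))).2 : Int),
         c || decide ((bpass (gather arr (PySem.List.pyRange o b k))).2 ≠ 0)) := by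
    intro N
    induction N with
    | zero =>
      intro o hN ho' arr' p' c' hb'
      rw [pyRange_pos_eq_nil hk (by omega)]
      simp [gather, bpass, scat]
    | succ N ihN =>
      intro o hN ho' arr' p' c' hb'
      by_cases hob : o < b
      · rw [pyRange_pos_cons hk hob]
        by_cases h2 : o + k < b
        · rw [pyRange_pos_cons hk h2]
          set R'' := PySem.List.pyRange (o + k + k) b k with hR''
          have hR''mem : ∀ q ∈ R'', o + k < q ∧ 0 ≤ q := by
            intro q hq
            rw [hR'', PySem.List.mem_pyRange_iff_of_pos hk] at hq
            constructor <;> omega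
          have hgather2 : gather arr' (o :: (o + k) :: R'')
              = PySem.List.pyGetD arr' o 0 :: PySem.List.pyGetD arr' (o + k) 0 :: gather arr' R'' := by
            simp [gather]
          rw [List.foldl_cons, hgather2]
          by_cases hswap : PySem.List.pyGetD arr' (o + k) 0 < PySem.List.pyGetD arr' o 0
          · have hstep1 : aPassStep k b (arr', p', c') o
                = (PySem.List.pySetD (PySem.List.pySetD arr' o (PySem.List.pyGetD arr' (o + k) 0))
                     (o + k) (PySem.List.pyGetD arr' o 0), p' + 1, true) := by
              simp only [aPassStep]
              rw [if_pos h2, if_pos hswap]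
            rw [hstep1]
            have hlen1 : (PySem.List.pySetD (PySem.List.pySetD arr' o (PySem.List.pyGetD arr' (o + k) 0))
                (o + k) (PySem.List.pyGetD arr' o 0)).length = arr'.length := by
              rw [PySem.List.length_pySetD, PySem.List.length_pySetD]
            have hstep := ihN (o + k) (by omega) (by omega)
              (PySem.List.pySetD (PySem.List.pySetD arr' o (PySem.List.pyGetD arr' (o + k) 0))
                 (o + k) (PySem.List.pyGetD arr' o 0)) (p' + 1) true
              (by rw [hlen1]; exact hb')
            rw [pyRange_pos_cons hk h2] at hstep
            rw [hstep]
            have hg1 : gather (PySem.List.pySetD (PySem.List.pySetD arr' o (PySem.List.pyGetD arr' (o + k) 0))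
                  (o + k) (PySem.List.pyGetD arr' o 0)) ((o + k) :: R'')
                = PySem.List.pyGetD arr' o 0 :: gather arr' R'' := by
              simp only [gather, List.map_cons]
              refine congrArg₂ List.cons ?_ ?_
              · rw [PySem.List.pySetD_of_nonneg _ _ (by omega : (0:Int) ≤ o + k),
                    PySem.List.pyGetD_eq_getElem _ 0 (by omega)
                      (by rw [List.length_set, PySem.List.length_pySetD]; omega)]
                exact List.getElem_set_self (by rw [List.length_set, PySem.List.length_pySetD]; omega)
              · apply List.map_congr_left
                intro q hq
                obtain ⟨hq1, hq2⟩ := hR''mem q hq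
                rw [pyGetD_pySetD_ne _ _ hq2 (by omega) (by omega),
                    pyGetD_pySetD_ne _ _ hq2 (by omega) (by omega)]
            rw [hg1]
            have hbp : bpass (PySem.List.pyGetD arr' o 0 :: PySem.List.pyGetD arr' (o + k) 0 :: gather arr' R'')
                = ((PySem.List.pyGetD arr' (o + k) 0 :: (bpass (PySem.List.pyGetD arr' o 0 :: gather arr' R'')).1),
                   (bpass (PySem.List.pyGetD arr' o 0 :: gather arr' R'')).2 + 1) := by
              rw [bpass, if_pos hswap]
            rw [hbp]
            have hBlen : (bpass (PySem.List.pyGetD arr' o 0 :: gather arr' R'')).1.length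
                = 1 + R''.length := by
              rw [bpass_length]; simp [gather]; omega
            obtain ⟨w, ws, hw⟩ : ∃ w ws,
                (bpass (PySem.List.pyGetD arr' o 0 :: gather arr' R'')).1 = w :: ws := by
              cases hc : (bpass (PySem.List.pyGetD arr' o 0 :: gather arr' R'')).1 with
              | nil => rw [hc] at hBlen; simp at hBlen; omega
              | cons w ws => exact ⟨w, ws, rfl⟩
            refine congrArg₂ Prod.mk ?_ (congrArg₂ Prod.mk (by push_cast; ring) (by simp))
            rw [hw, scat, scat, scat]
            have hss : PySem.List.pySetD (PySem.List.pySetD (PySem.List.pySetD arr' o (PySem.List.pyGetD arr' (o + k) 0))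
                  (o + k) (PySem.List.pyGetD arr' o 0)) (o + k) w
                = PySem.List.pySetD (PySem.List.pySetD arr' o (PySem.List.pyGetD arr' (o + k) 0)) (o + k) w := by
              rw [PySem.List.pySetD_of_nonneg (i := o + k) _ _ (by omega),
                  PySem.List.pySetD_of_nonneg (i := o + k) _ _ (by omega),
                  PySem.List.pySetD_of_nonneg (i := o + k) _ _ (by omega), List.set_set]
            rw [hss]
          · have hstep1 : aPassStep k b (arr', p', c') o = (arr', p', c') := by
              simp only [aPassStep]
              rw [if_pos h2, if_neg hswap]
            rw [hstep1]
            have hstep := ihN (o + k) (by omega) (by omega) arr' p' c' hb'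
            rw [pyRange_pos_cons hk h2] at hstep
            rw [hstep]
            have hgather : gather arr' ((o + k) :: R'')
                = PySem.List.pyGetD arr' (o + k) 0 :: gather arr' R'' := by
              simp [gather]
            rw [hgather]
            have hbp : bpass (PySem.List.pyGetD arr' o 0 :: PySem.List.pyGetD arr' (o + k) 0 :: gather arr' R'')
                = ((PySem.List.pyGetD arr' o 0 :: (bpass (PySem.List.pyGetD arr' (o + k) 0 :: gather arr' R'')).1),
                   (bpass (PySem.List.pyGetD arr' (o + k) 0 :: gather arr' R'')).2) := by
              rw [bpass, if_neg hswap]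
            rw [hbp]
            rw [scat, pySetD_self arr' (by omega) (by omega)]
        · have hnil : PySem.List.pyRange (o + k) b k = [] := pyRange_pos_eq_nil hk (by omega)
          rw [hnil]
          have hstep1 : aPassStep k b (arr', p', c') o = (arr', p', c') := by
            simp only [aPassStep]
            rw [if_neg h2]
          rw [List.foldl_cons, hstep1, List.foldl_nil]
          have hgather : gather arr' [o] = [PySem.List.pyGetD arr' o 0] := by simp [gather]
          rw [hgather]
          have hbp : bpass [PySem.List.pyGetD arr' o 0] = ([PySem.List.pyGetD arr' o 0], 0) := by simp [bpass]
          rw [hbp]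
          simp only [scat]
          rw [pySetD_self arr' (by omega) (by omega)]
          simp
      · rw [pyRange_pos_eq_nil hk (by omega)]
        simp [gather, bpass, scat]
  exact main (b - o).toNat o (le_refl _) ho arr p c hb

-- A's while loop sorts the stride-k subarray and adds its inversion count
theorem aWhile_eq (k b : Int) (hk : 0 < k) (o : Int) (ho : 0 ≤ o) (arr : List Int)
    (hb : b ≤ (arr.length : Int)) (p : Int) (fuel : Nat)
    (hfuel : inv (gather arr (PySem.List.pyRange o b k)) < fuel) :
    aWhile fuel k b o arr p
    = (scat arr (PySem.List.pyRange o b k) (csorted (gather arr (PySem.List.pyRange o b k))),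
       p + (inv (gather arr (PySem.List.pyRange o b k)) : Int)) := by
  induction fuel generalizing arr p with
  | zero => omega
  | succ fuel ih =>
    have hok : OkPos arr.length (PySem.List.pyRange o b k) := okpos_pyRange hk ho hb
    have hglen : (gather arr (PySem.List.pyRange o b k)).length
        = (PySem.List.pyRange o b k).length := by simp [gather]
    simp only [aWhile]
    rw [passA_decomp k b hk arr hb o ho p false]
    by_cases hs : (bpass (gather arr (PySem.List.pyRange o b k))).2 = 0
    · simp only [hs]
      norm_num
      rw [bpass_zero_eq hs]
      have hsor := bpass_zero_sorted hs
      rw [show csorted (gather arr (PySem.List.pyRange o b k)) = gather arr (PySem.List.pyRange o b k) from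
            PySem.List.sorted_eq_self_of_pairwise _ _ (by simpa using hsor),
          inv_eq_zero_of_pairwise hsor]
      norm_num
    · have hflag : (false || decide ((bpass (gather arr (PySem.List.pyRange o b k))).2 ≠ 0)) = true := by
        simp [hs]
      rw [hflag]
      simp only [if_true]
      have hlen1 : (scat arr (PySem.List.pyRange o b k)
          (bpass (gather arr (PySem.List.pyRange o b k))).1).length = arr.length := length_scat _ _ _
      have hg1 : gather (scat arr (PySem.List.pyRange o b k)
            (bpass (gather arr (PySem.List.pyRange o b k))).1) (PySem.List.pyRange o b k)
          = (bpass (gather arr (PySem.List.pyRange o b k))).1 :=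
        gather_scat_same rfl (by rw [bpass_length, hglen]) hok
      have hinv := bpass_inv (gather arr (PySem.List.pyRange o b k))
      have hrec := ih (scat arr (PySem.List.pyRange o b k)
          (bpass (gather arr (PySem.List.pyRange o b k))).1)
        (by rw [hlen1]; exact hb)
        (p + ((bpass (gather arr (PySem.List.pyRange o b k))).2 : Int))
        (by rw [hg1]; omega)
      rw [hrec, hg1]
      have hperm : (bpass (gather arr (PySem.List.pyRange o b k))).1.Perm
          (gather arr (PySem.List.pyRange o b k)) := bpass_perm _
      have hcs : csorted (bpass (gather arr (PySem.List.pyRange o b k))).1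
          = csorted (gather arr (PySem.List.pyRange o b k)) := by
        unfold csorted
        exact (PySem.List.sorted_id_eq_sorted_id_iff_perm _ _).mpr hperm
      rw [hcs]
      refine congrArg₂ Prod.mk ?_ ?_
      · exact scat_scat (by rw [bpass_length, hglen])
          (by unfold csorted; rw [PySem.List.length_sorted, hglen]) hok.1 (fun q hq => (hok.2 q hq).1)
      · have : inv (bpass (gather arr (PySem.List.pyRange o b k))).1
            = inv (gather arr (PySem.List.pyRange o b k))
              - (bpass (gather arr (PySem.List.pyRange o b k))).2 := by omega
        rw [this]
        push_cast [Nat.cast_sub (by omega : (bpass (gather arr (PySem.List.pyRange o b k))).2 ≤ inv (gather arr (PySem.List.pyRange o b k)))]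
        ring

-- merge/inversion lemmas for B
theorem cross_cons_left (x : Int) (l r : List Int) :
    cross (x :: l) r = r.countP (fun y => decide (y < x)) + cross l r := by
  simp [cross]
theorem cross_nil_right (l : List Int) : cross l [] = 0 := by
  simp [cross]
theorem cross_cons_right (l : List Int) (y : Int) (r : List Int) :
    cross l (y :: r) = l.countP (fun x => decide (y < x)) + cross l r := by
  induction l with
  | nil => simp [cross]
  | cons x l ih =>
    rw [cross_cons_left, cross_cons_left, ih, List.countP_cons, List.countP_cons]
    omega
theorem inv_append (l r : List Int) : inv (l ++ r) = inv l + inv r + cross l r := by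
  induction l with
  | nil => simp [inv, cross]
  | cons x l ih =>
    simp only [List.cons_append, inv, cross_cons_left]
    rw [List.countP_append, ih]
    omega
theorem cross_perm {l l' r r' : List Int} (hl : l.Perm l') (hr : r.Perm r') :
    cross l r = cross l' r' := by
  have h1 : ∀ x : Int, r.countP (fun y => decide (y < x)) = r'.countP (fun y => decide (y < x)) :=
    fun x => hr.countP_congr (fun _ _ => rfl)
  unfold cross
  rw [List.map_congr_left (fun x _ => h1 x)]
  exact (hl.map _).sum_eq
theorem mergeC_snd_perm (l r : List Int) (acc : Int) : (mergeC l r acc).2.Perm (l ++ r) := by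
  fun_induction mergeC l r acc with
  | case1 => simp
  | case2 => simp
  | case3 x l y r acc h rec ih =>
    exact (ih.cons x)
  | case4 x l y r acc h rec ih =>
    exact (ih.cons y).trans List.perm_middle.symm
theorem mergeC_snd_sorted {l r : List Int} (hl : l.Pairwise (· ≤ ·)) (hr : r.Pairwise (· ≤ ·))
    (acc : Int) : (mergeC l r acc).2.Pairwise (· ≤ ·) := by
  fun_induction mergeC l r acc with
  | case1 => exact hr
  | case2 => exact hl
  | case3 x l y r acc h rec ih =>
    refine List.Pairwise.cons ?_ (ih hl.of_cons hr)
    intro z hz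
    have hz' : z ∈ l ++ y :: r := (mergeC_snd_perm l (y :: r) _).mem_iff.mp hz
    rcases List.mem_append.1 hz' with hz' | hz'
    · exact List.rel_of_pairwise_cons hl hz'
    · rcases List.mem_cons.1 hz' with rfl | hz'
      · exact h
      · exact le_trans h (List.rel_of_pairwise_cons hr hz')
  | case4 x l y r acc h rec ih =>
    refine List.Pairwise.cons ?_ (ih hl hr.of_cons)
    intro z hz
    have hz' : z ∈ (x :: l) ++ r := (mergeC_snd_perm (x :: l) r _).mem_iff.mp hz
    rcases List.mem_append.1 hz' with hz' | hz'
    · rcases List.mem_cons.1 hz' with rfl | hz'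
      · omega
      · have := List.rel_of_pairwise_cons hl hz'
        omega
    · exact List.rel_of_pairwise_cons hr hz'
theorem mergeC_fst {l r : List Int} (hl : l.Pairwise (· ≤ ·)) (hr : r.Pairwise (· ≤ ·))
    (acc : Int) : (mergeC l r acc).1 = acc + (cross l r : Int) := by
  fun_induction mergeC l r acc with
  | case1 => simp [cross]
  | case2 => simp [cross_nil_right]
  | case3 x l y r acc h rec ih =>
    show (mergeC l (y :: r) acc).1 = acc + (cross (x :: l) (y :: r) : Int)
    rw [ih hl.of_cons hr]
    have hcnt : (y :: r).countP (fun z => decide (z < x)) = 0 := by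
      apply List.countP_eq_zero.mpr
      intro z hz
      rcases List.mem_cons.1 hz with rfl | hz
      · simpa using by omega
      · have := List.rel_of_pairwise_cons hr hz
        simpa using by omega
    rw [cross_cons_left, hcnt]
    norm_num
  | case4 x l y r acc h rec ih =>
    show (mergeC (x :: l) r (acc + ((x :: l).length : Int))).1 = acc + (cross (x :: l) (y :: r) : Int)
    rw [ih hl hr.of_cons]
    have hcnt : (x :: l).countP (fun z => decide (y < z)) = (x :: l).length := by
      apply List.countP_eq_length.mpr
      intro z hz
      rcases List.mem_cons.1 hz with rfl | hz
      · simpa using by omega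
      · have := List.rel_of_pairwise_cons hl hz
        simpa using by omega
    rw [cross_cons_right, hcnt]
    push_cast
    ring
theorem csorted_pairwise (l : List Int) : (csorted l).Pairwise (· ≤ ·) := by
  unfold csorted
  simpa using PySem.List.sorted_pairwise l (fun x => x)
theorem csorted_perm (l : List Int) : (csorted l).Perm l := by
  unfold csorted
  exact PySem.List.sorted_perm l _ _
theorem sortCount_eq (l : List Int) : sortCount l = ((inv l : Int), csorted l) := by
  have main : ∀ (n : Nat) (l : List Int), l.length ≤ n → sortCount l = ((inv l : Int), csorted l) := by
    intro n
    induction n with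
    | zero =>
      intro l hl
      have : l = [] := List.eq_nil_of_length_eq_zero (by omega)
      subst this
      simp [sortCount, inv, csorted, PySem.List.sorted]
    | succ n ihn =>
      intro l hl
      match l with
      | [] => simp [sortCount, inv, csorted, PySem.List.sorted]
      | [x] =>
        rw [sortCount]
        have : csorted [x] = [x] := PySem.List.sorted_eq_self_of_pairwise _ _ (by simp)
        simp [inv, this]
      | x :: y :: t =>
        rw [sortCount]
        have hlen : (x :: y :: t).length = t.length + 2 := by simp
        have hmidlen : ((x :: y :: t).take ((x :: y :: t).length / 2)).length ≤ n := by
          simp only [List.length_take]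
          omega
        have hdroplen : ((x :: y :: t).drop ((x :: y :: t).length / 2)).length ≤ n := by
          simp only [List.length_drop]
          omega
        rw [ihn _ hmidlen, ihn _ hdroplen]
        set tk := (x :: y :: t).take ((x :: y :: t).length / 2) with htk
        set dr := (x :: y :: t).drop ((x :: y :: t).length / 2) with hdr
        have htd : tk ++ dr = x :: y :: t := List.take_append_drop _ _
        have hsp : (csorted tk).Pairwise (· ≤ ·) := csorted_pairwise tk
        have hsp' : (csorted dr).Pairwise (· ≤ ·) := csorted_pairwise dr
        have hfst := mergeC_fst hsp hsp' ((inv tk : Int) + (inv dr : Int))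
        have hsnd_perm := mergeC_snd_perm (csorted tk) (csorted dr) ((inv tk : Int) + (inv dr : Int))
        have hsnd_sort := mergeC_snd_sorted hsp hsp' ((inv tk : Int) + (inv dr : Int))
        refine congrArg₂ Prod.mk ?_ ?_
        · rw [hfst]
          have hcr : cross (csorted tk) (csorted dr) = cross tk dr :=
            cross_perm (csorted_perm tk) (csorted_perm dr)
          have hia : inv (x :: y :: t) = inv tk + inv dr + cross tk dr := by
            rw [← htd, inv_append]
          rw [hcr]
          push_cast
          omega
        · apply PySem.List.eq_of_perm_of_pairwise_le_of_injective (fun x => x)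
            (Function.injective_id)
          · refine hsnd_perm.trans ?_
            refine (((csorted_perm tk).append (csorted_perm dr)).trans ?_).trans (csorted_perm (x :: y :: t)).symm
            rw [htd]
          · simpa using hsnd_sort
          · simpa using csorted_pairwise (x :: y :: t)
  exact main l.length l (le_refl _)

-- the bridge between A's sequential fold over offsets and B's
theorem k_sort_eq_main (array : List Int) (k b : Int) (hk : 0 < k)
    (hb : b ≤ (array.length : Int)) : k_sort array k b = k_sort_alt array k b := by
  -- abbreviations
  have hstepA : ∀ (arr : List Int) (p o : Int), arr.length = array.length → 0 ≤ o →
      aWhile (array.length * array.length + 1) k b o arr p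
      = (scat arr (PySem.List.pyRange o b k) (csorted (gather arr (PySem.List.pyRange o b k))),
         p + (inv (gather arr (PySem.List.pyRange o b k)) : Int)) := by
    intro arr p o hlen ho
    refine aWhile_eq k b hk o ho arr ?_ p _ ?_
    · omega
    have h1 : (PySem.List.pyRange o b k).length ≤ array.length := by
      have := length_pyRange_le (n := arr.length) (b := b) hk ho (by omega)
      omega
    have h2 : inv (gather arr (PySem.List.pyRange o b k))
        ≤ (PySem.List.pyRange o b k).length * (PySem.List.pyRange o b k).length := by
      have := inv_le_sq (gather arr (PySem.List.pyRange o b k))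
      simpa [gather] using this
    have := Nat.mul_le_mul h1 h1
    omega
  have hdisj : ∀ o o' : Int, 0 ≤ o → 0 ≤ o' → o < k → o' < k → o ≠ o' →
      ∀ q ∈ PySem.List.pyRange o b k, q ∉ PySem.List.pyRange o' b k := by
    intro o o' ho ho' hok ho'k hne q hq hq'
    rw [PySem.List.mem_pyRange_iff_of_pos hk] at hq hq'
    have hd1 : k ∣ q - o := hq.2.2
    have hd2 : k ∣ q - o' := hq'.2.2
    have hd : k ∣ o - o' := by
      have := dvd_sub hd2 hd1
      simpa using this
    rcases lt_trichotomy o o' with h | h | h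
    · have h2 : k ∣ o' - o := by
        have := dvd_neg.2 hd
        rwa [neg_sub] at this
      have := Int.le_of_dvd (by omega) h2
      omega
    · exact hne h
    · have := Int.le_of_dvd (by omega) hd
      omega
  have hokR : ∀ (arr : List Int), arr.length = array.length → ∀ o : Int, 0 ≤ o →
      OkPos arr.length (PySem.List.pyRange o b k) := by
    intro arr hlen o ho
    exact okpos_pyRange hk ho (by omega)
  have hglenR : ∀ (arr : List Int) (o : Int),
      (gather arr (PySem.List.pyRange o b k)).length = (PySem.List.pyRange o b k).length := by
    intro arr o; simp [gather]
  -- the joint induction over offsets 0..j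
  have bridge : ∀ j : Nat, (j : Int) ≤ k →
      (((PySem.List.pyRange 0 (j : Int) 1).foldl
          (fun (st : List Int × Int) o =>
            aWhile (array.length * array.length + 1) k b o st.1 st.2) (array, 0)).1.length
        = array.length)
      ∧ ((PySem.List.pyRange 0 (j : Int) 1).foldl
          (fun (st : List Int × Int) o =>
            (scat st.1 (PySem.List.pyRange o b k) (csorted (gather array (PySem.List.pyRange o b k))),
             st.2 + (inv (gather array (PySem.List.pyRange o b k)) : Int))) (array, 0)
        = (PySem.List.pyRange 0 (j : Int) 1).foldl
          (fun (st : List Int × Int) o =>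
            aWhile (array.length * array.length + 1) k b o st.1 st.2) (array, 0))
      ∧ (∀ o : Int, (j : Int) ≤ o → o < k →
          gather (((PySem.List.pyRange 0 (j : Int) 1).foldl
            (fun (st : List Int × Int) o =>
              aWhile (array.length * array.length + 1) k b o st.1 st.2) (array, 0)).1)
            (PySem.List.pyRange o b k) = gather array (PySem.List.pyRange o b k))
      ∧ (∀ o : Int, 0 ≤ o → o < (j : Int) →
          gather (((PySem.List.pyRange 0 (j : Int) 1).foldl
            (fun (st : List Int × Int) o =>
              aWhile (array.length * array.length + 1) k b o st.1 st.2) (array, 0)).1)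
            (PySem.List.pyRange o b k) = csorted (gather array (PySem.List.pyRange o b k))) := by
    intro j
    induction j with
    | zero =>
      intro hj
      refine ⟨by simp, by simp, ?_, ?_⟩
      · intro o ho hok
        simp
      · intro o ho hoj
        omega
    | succ j ihj =>
      intro hj
      obtain ⟨ih1, ih2, ih3, ih4⟩ := ihj (by push_cast at hj ⊢; omega)
      have hcast : ((j + 1 : Nat) : Int) = (j : Int) + 1 := by push_cast; ring
      rw [hcast, PySem.List.pyRange_one_succ_right (by positivity)]
      rw [List.foldl_append, List.foldl_append, List.foldl_cons, List.foldl_nil,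
          List.foldl_cons, List.foldl_nil]
      rw [ih2]
      set sA := (PySem.List.pyRange 0 (j : Int) 1).foldl
        (fun (st : List Int × Int) o =>
          aWhile (array.length * array.length + 1) k b o st.1 st.2) (array, 0) with hsA
      have hgj : gather sA.1 (PySem.List.pyRange (j : Int) b k)
          = gather array (PySem.List.pyRange (j : Int) b k) := ih3 _ (le_refl _) (by omega)
      have hstep : aWhile (array.length * array.length + 1) k b (j : Int) sA.1 sA.2
          = (scat sA.1 (PySem.List.pyRange (j : Int) b k)
               (csorted (gather array (PySem.List.pyRange (j : Int) b k))),
             sA.2 + (inv (gather array (PySem.List.pyRange (j : Int) b k)) : Int)) := by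
        rw [hstepA sA.1 sA.2 (j : Int) ih1 (by positivity), hgj]
      rw [hstep]
      have hlen' : (scat sA.1 (PySem.List.pyRange (j : Int) b k)
          (csorted (gather array (PySem.List.pyRange (j : Int) b k)))).length = array.length := by
        rw [length_scat]; exact ih1
      refine ⟨hlen', rfl, ?_, ?_⟩
      · intro o ho hok
        have hdis := hdisj o (j : Int) (by omega) (by positivity) hok (by omega) (by omega)
        rw [gather_scat_disjoint (fun q hq => ((PySem.List.mem_pyRange_iff_of_pos hk q).1 hq).1.trans' (by omega))
            (fun q hq => le_trans (by positivity) ((PySem.List.mem_pyRange_iff_of_pos hk q).1 hq).1) hdis]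
        exact ih3 o (by omega) hok
      · intro o ho hoj
        by_cases hoeq : o = (j : Int)
        · subst hoeq
          have hvlen : (csorted (gather array (PySem.List.pyRange (j : Int) b k))).length
              = (PySem.List.pyRange (j : Int) b k).length := by
            unfold csorted
            rw [PySem.List.length_sorted]
            simp [gather]
          rw [gather_scat_same ih1 hvlen (ih1 ▸ hokR sA.1 ih1 (j : Int) (by positivity))]
        · have hdis := hdisj o (j : Int) ho (by positivity) (by omega) (by omega) hoeq
          rw [gather_scat_disjoint (fun q hq => le_trans ho ((PySem.List.mem_pyRange_iff_of_pos hk q).1 hq).1)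
              (fun q hq => le_trans (by positivity) ((PySem.List.mem_pyRange_iff_of_pos hk q).1 hq).1) hdis]
          exact ih4 o ho (by omega)
  -- identity segment of A's offsets (b ≤ o): the stride-k subarray is empty
  have hidseg : ∀ (os : List Int) (st : List Int × Int), st.1.length = array.length →
      (∀ o ∈ os, b ≤ o ∧ 0 ≤ o) →
      os.foldl (fun (st : List Int × Int) o =>
        aWhile (array.length * array.length + 1) k b o st.1 st.2) st = st := by
    intro os
    induction os with
    | nil => intro st _ _; rfl
    | cons o os ih =>
      intro st hlen hos
      obtain ⟨hbo, ho0⟩ := hos o (List.mem_cons_self ..)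
      rw [List.foldl_cons]
      have hnil : PySem.List.pyRange o b k = [] := pyRange_pos_eq_nil hk hbo
      have := hstepA st.1 st.2 o hlen ho0
      rw [hnil] at this
      simp only [gather, List.map_nil] at this
      have hempty : csorted ([] : List Int) = [] := rfl
      rw [hempty] at this
      simp only [scat, inv] at this
      rw [this]
      norm_num
      exact (ih (st.1, st.2) hlen (fun q hq => hos q (List.mem_cons_of_mem _ hq))).trans Prod.mk.eta
  -- assemble
  set c : Int := min k (max b 0) with hc
  have hc0 : 0 ≤ c := by omega
  have hck : c ≤ k := by omega
  unfold k_sort k_sort_alt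
  simp only [if_pos hk]
  have hm : min b (array.length : Int) = b := min_eq_left hb
  rw [hm]
  -- A's offset list: 0..c-1, then identity segment c..k-1, then offset k
  have hsplitA : PySem.List.pyRange 0 (k + 1) 1
      = (PySem.List.pyRange 0 c 1 ++ PySem.List.pyRange c k 1) ++ [k] := by
    rw [← PySem.List.pyRange_one_append 0 c k hc0 hck,
        PySem.List.pyRange_one_succ_right (by omega : (0:Int) ≤ k)]
  rw [hsplitA]
  rw [List.foldl_append, List.foldl_append, List.foldl_cons, List.foldl_nil]
  obtain ⟨b1, b2, b3, b4⟩ := bridge c.toNat (by omega)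
  rw [show ((c.toNat : Nat) : Int) = c by omega] at b1 b2 b3 b4
  rw [hidseg _ _ b1 (by
    intro o ho
    have := (PySem.List.mem_pyRange_one).1 ho
    constructor <;> omega)]
  set sC := (PySem.List.pyRange 0 c 1).foldl
    (fun (st : List Int × Int) o =>
      aWhile (array.length * array.length + 1) k b o st.1 st.2) (array, 0) with hsC
  -- the final extra offset k is a no-op: class k is a tail of the already sorted class 0
  have hlast : aWhile (array.length * array.length + 1) k b k sC.1 sC.2 = sC := by
    by_cases hbpos : 0 < b
    · have hcons : PySem.List.pyRange 0 b k = 0 :: PySem.List.pyRange k b k := by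
        have h0 := pyRange_pos_cons (a := 0) hk hbpos
        rwa [zero_add] at h0
      have hg0 : gather sC.1 (PySem.List.pyRange 0 b k)
          = csorted (gather array (PySem.List.pyRange 0 b k)) := b4 0 (le_refl _) (by omega)
      have hgk_pw : (gather sC.1 (PySem.List.pyRange k b k)).Pairwise (· ≤ ·) := by
        have hpw := csorted_pairwise (gather array (PySem.List.pyRange 0 b k))
        rw [← hg0, hcons] at hpw
        simp only [gather, List.map_cons] at hpw
        exact hpw.of_cons
      have := hstepA sC.1 sC.2 k b1 (by omega)
      rw [this]
      rw [show csorted (gather sC.1 (PySem.List.pyRange k b k)) = gather sC.1 (PySem.List.pyRange k b k) from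
            PySem.List.sorted_eq_self_of_pairwise _ _ (by simpa using hgk_pw),
          inv_eq_zero_of_pairwise hgk_pw]
      rw [scat_gather_self (hokR sC.1 b1 k (by omega))]
      norm_num
    · have hnil : PySem.List.pyRange k b k = [] := pyRange_pos_eq_nil hk (by omega)
      have := hstepA sC.1 sC.2 k b1 (by omega)
      rw [hnil] at this
      simp only [gather, List.map_nil] at this
      rw [show csorted ([] : List Int) = [] from rfl] at this
      simp only [scat, inv] at this
      rw [this]
      norm_num
  rw [hlast]
  -- B's offsets coincide with 0..c-1, and its step is the normalized scatter step
  have hBrange : PySem.List.pyRange 0 (min k b) 1 = PySem.List.pyRange 0 c 1 := by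
    by_cases hb0 : 0 ≤ b
    · have : c = min k b := by omega
      rw [this]
    · rw [PySem.List.pyRange_one_eq_nil (by omega), PySem.List.pyRange_one_eq_nil (by omega)]
  rw [hBrange]
  have hfunB : (fun (st : List Int × Int) off =>
      (((PySem.List.pyRange off b k).zip
          (sortCount ((PySem.List.pyRange off b k).map (fun i => PySem.List.pyGetD array i 0))).2).foldl
        (fun o iv => PySem.List.pySetD o iv.1 iv.2) st.1,
       st.2 + (sortCount ((PySem.List.pyRange off b k).map (fun i => PySem.List.pyGetD array i 0))).1))
      = (fun (st : List Int × Int) o =>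
      (scat st.1 (PySem.List.pyRange o b k) (csorted (gather array (PySem.List.pyRange o b k))),
       st.2 + (inv (gather array (PySem.List.pyRange o b k)) : Int))) := by
    funext st off
    rw [show (PySem.List.pyRange off b k).map (fun i => PySem.List.pyGetD array i 0)
          = gather array (PySem.List.pyRange off b k) from rfl,
        sortCount_eq, zipfold_eq_scat]
  rw [hfunB, b2]
theorem k_sort_eq_big (array : List Int) (k b : Int) (hk : 0 < k)
    (hn : (array.length : Int) < b) (hkb : b ≤ k) : k_sort array k b = k_sort_alt array k b := by
  have hid1 : ∀ (arr : List Int) (p : Int) (o : Int), 0 ≤ o →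
      aWhile (array.length * array.length + 1) k b o arr p = (arr, p) := by
    intro arr p o ho
    have hpass : (PySem.List.pyRange o b k).foldl (aPassStep k b) (arr, p, false) = (arr, p, false) := by
      refine (PySem.List.foldl_congr_mem _ _ (fun st _ => st) _ ?_).trans
        (PySem.List.foldl_ignore _ _)
      intro st inner hin
      have h1 : o ≤ inner := ((PySem.List.mem_pyRange_iff_of_pos hk inner).1 hin).1
      simp [aPassStep, show ¬ inner + k < b by omega]
    simp only [aWhile, hpass]
    simp
  unfold k_sort k_sort_alt
  have hA : (PySem.List.pyRange 0 (k + 1) 1).foldl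
      (fun (st : List Int × Int) o => aWhile (array.length * array.length + 1) k b o st.1 st.2)
      (array, 0) = (array, 0) := by
    refine (PySem.List.foldl_congr_mem _ _ (fun st _ => st) _ ?_).trans
      (PySem.List.foldl_ignore _ _)
    intro st o hin
    have h1 : 0 ≤ o := ((PySem.List.mem_pyRange_one).1 hin).1
    exact hid1 st.1 st.2 o h1
  have hm1 : min b (array.length : Int) = (array.length : Int) := min_eq_right (by omega)
  have hm2 : min k (array.length : Int) = (array.length : Int) := min_eq_right (by omega)
  have hB : ∀ os : List Int, (∀ o ∈ os, 0 ≤ o ∧ o < (array.length : Int)) →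
      os.foldl (fun (st : List Int × Int) off =>
        (((PySem.List.pyRange off (array.length : Int) k).zip
            (sortCount ((PySem.List.pyRange off (array.length : Int) k).map
              (fun i => PySem.List.pyGetD array i 0))).2).foldl
          (fun o iv => PySem.List.pySetD o iv.1 iv.2) st.1,
         st.2 + (sortCount ((PySem.List.pyRange off (array.length : Int) k).map
              (fun i => PySem.List.pyGetD array i 0))).1))
        (array, 0) = (array, 0) := by
    intro os hos
    induction os with
    | nil => rfl
    | cons o os ih =>
      obtain ⟨ho0, hon⟩ := hos o (List.mem_cons_self ..)
      rw [List.foldl_cons]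
      have hr : PySem.List.pyRange o (array.length : Int) k = [o] := by
        rw [pyRange_pos_cons hk hon, pyRange_pos_eq_nil hk (by omega)]
      rw [hr]
      have hsc : sortCount [PySem.List.pyGetD array o 0] = (0, [PySem.List.pyGetD array o 0]) := by
        rw [sortCount]
      simp only [List.map_cons, List.map_nil, hsc, List.zip_cons_cons, List.zip_nil_right,
        List.foldl_cons, List.foldl_nil]
      rw [pySetD_self array ho0 hon]
      norm_num
      exact ih (fun q hq => hos q (List.mem_cons_of_mem _ hq))
  simp only [hA, hm1, hm2, if_pos hk]
  rw [hB (PySem.List.pyRange 0 (array.length : Int) 1)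
    (fun q hq => (PySem.List.mem_pyRange_one).1 hq)]
theorem k_sort_eq_neg (array : List Int) (k b : Int) (hk : k < 0) :
    k_sort array k b = k_sort_alt array k b := by
  unfold k_sort k_sort_alt
  rw [PySem.List.pyRange_one_eq_nil (by omega : k + 1 ≤ 0)]
  simp [show ¬ 0 < k by omega]

-- ===== VERDICT (by name: the statement is the Claim_ definition above) =====
theorem k_sort_spec : Claim_equal_k_sort := by
  intro array k length _ hpre
  unfold Spec_k_sort
  rcases hpre with ⟨hk0, hnot⟩
  rcases lt_trichotomy k 0 with hk | hk | hk
  · exact k_sort_eq_neg array k length hk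
  · exact absurd hk hk0
  · rcases le_or_gt length (array.length : Int) with hle | hgt
    · exact k_sort_eq_main array k length hk hle
    · have hkb : length ≤ k := by
        by_contra h
        exact hnot ⟨hk, by omega, hgt⟩
      exact k_sort_eq_big array k length hk hgt hkb
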